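-- pv_equiv track=rewrite | github.com/jbsam2/algo_problem | programmers/풍선터트리기.py | solution
-- ===== SOURCE A (Python) =====
-- def solution(a):
--     answer = 0;n=len(a)
--     l=r=1<<32
--     b=[[0]*2 for _ in range(n)]
--     for i in range(n):
--         if l>a[i]:l=a[i]
--         b[i][0]=l
--     for i in range(n-1,-1,-1):
--         if r>a[i]:r=a[i]
--         b[i][1]=r
--     for i in range(n):
--         if a[i]<=b[i][0] or a[i]<=b[i][1]:answer+=1
--     return answer
-- ===== SOURCE B (Python) =====
-- def solution(a):
--     if not a:
--         return 0
--
--     def count_running_mins(xs):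
--         cnt = 0
--         m = xs[0]
--         for x in xs:
--             if x <= m:
--                 cnt += 1
--                 m = x
--         return cnt
--
--     return count_running_mins(a) + count_running_mins(list(reversed(a))) - a.count(min(a))
-- ===== Notes on version B (the rewrite author's own statement) =====
-- stated objective: simpler
-- what changed: Instead of materializing an n x 2 table of prefix/suffix minima and a third counting pass over it, B counts prefix-min positions in one running-min pass, suffix-min positions in one pass over the reversed list, and subtracts the multiplicity of the global minimum (the positions counted twice), using no auxiliary table.
import Mathlib
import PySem

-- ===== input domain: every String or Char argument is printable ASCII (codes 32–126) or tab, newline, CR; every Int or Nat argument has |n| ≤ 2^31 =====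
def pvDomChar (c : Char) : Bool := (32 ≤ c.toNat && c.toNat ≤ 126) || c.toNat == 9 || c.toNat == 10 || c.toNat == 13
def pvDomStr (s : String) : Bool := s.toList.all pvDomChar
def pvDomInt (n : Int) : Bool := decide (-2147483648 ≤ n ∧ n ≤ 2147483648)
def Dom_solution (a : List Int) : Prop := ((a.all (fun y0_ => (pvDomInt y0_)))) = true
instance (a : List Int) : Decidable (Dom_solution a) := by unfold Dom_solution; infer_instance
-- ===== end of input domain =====

-- B replaces A's n×2 table of prefix/suffix minima and its three passes by two running-min
-- counting passes plus an inclusion–exclusion correction (count of the global minimum): simpler.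

-- ===== PORT A =====
-- the 'if l > a[i]: l = a[i]' update
def pyMin (l x : Int) : Int := if l > x then x else l

-- first loop: 'for i in range(n): if l>a[i]: l=a[i]; b[i][0]=l' — recursion over a and b in step
def loop1 (l : Int) : List Int → List (Int × Int) → List (Int × Int)
  | [], b => b
  | _ :: _, [] => []
  | x :: xs, (_, q) :: b =>
      let l' := pyMin l x
      (l', q) :: loop1 l' xs b

-- second loop: 'for i in range(n-1,-1,-1): if r>a[i]: r=a[i]; b[i][1]=r' — tail processed first
def loop2 (r : Int) : List Int → List (Int × Int) → Int × List (Int × Int)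
  | [], b => (r, b)
  | _ :: _, [] => (r, [])
  | x :: xs, (p, _) :: b =>
      let res := loop2 r xs b
      let r'' := pyMin res.1 x
      (r'', (p, r'') :: res.2)

-- third loop: 'if a[i]<=b[i][0] or a[i]<=b[i][1]: answer += 1'
def loop3 (answer : Int) : List Int → List (Int × Int) → Int
  | [], _ => answer
  | _ :: _, [] => answer
  | x :: xs, (p, q) :: b =>
      loop3 (if x ≤ p ∨ x ≤ q then answer + 1 else answer) xs b

def solution (a : List Int) : Int :=
  let n := a.length
  let b0 : List (Int × Int) := List.replicate n (0, 0)
  let b1 := loop1 ((1 : Int) <<< 32) a b0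
  let b2 := (loop2 ((1 : Int) <<< 32) a b1).2
  loop3 0 a b2

-- ===== PORT B =====
-- helper count_running_mins of Source B (only ever called on nonempty lists; [] arm is a totality guard)
def countRunningMins (xs : List Int) : Int :=
  match xs with
  | [] => 0
  | x0 :: _ =>
      (xs.foldl (fun (s : Int × Int) x => if x ≤ s.2 then (s.1 + 1, x) else s) (0, x0)).1

def solution_alt (a : List Int) : Int :=
  match PySem.List.min? a (fun y => y) with
  | none => 0
  | some g => countRunningMins a + countRunningMins a.reverse - PySem.List.count a g

-- ===== PRECONDITION & SPEC =====
def Spec_solution (a : List Int) (out : Int) : Prop := out = solution_alt a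
instance (a : List Int) (out : Int) : Decidable (Spec_solution a out) := by unfold Spec_solution; infer_instance

-- ===== CLAIM (what is proved, stated in full; the proofs are below) =====
def Claim_equal_solution : Prop := ∀ (a : List Int), Dom_solution a → Spec_solution a (solution a)

-- ===== LEMMAS AND PROOFS =====

-- H r xs = minimum of xs and r (the value of A's variable r after the backward loop)
def H (r : Int) : List Int → Int
  | [] => r
  | x :: xs => pyMin (H r xs) x

-- count of forward running-min positions (condition 'x ≤ running min so far incl. init l')
def cF (l : Int) : List Int → Int
  | [] => 0
  | x :: xs => (if x ≤ l then 1 else 0) + cF (pyMin l x) xs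

-- count of backward running-min positions (init r at the right end)
def cB (r : Int) : List Int → Int
  | [] => 0
  | x :: xs => (if x ≤ H r xs then 1 else 0) + cB r xs

-- count of positions satisfying the OR (= A's answer) and the AND
def cO (l r : Int) : List Int → Int
  | [] => 0
  | x :: xs => (if x ≤ l ∨ x ≤ H r xs then 1 else 0) + cO (pyMin l x) r xs

def cA (l r : Int) : List Int → Int
  | [] => 0
  | x :: xs => (if x ≤ l ∧ x ≤ H r xs then 1 else 0) + cA (pyMin l x) r xs

theorem pyMin_eq_min (l x : Int) : pyMin l x = min l x := by
  unfold pyMin; split <;> omega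

theorem loop1_length (l : Int) (xs : List Int) (b : List (Int × Int))
    (h : b.length = xs.length) : (loop1 l xs b).length = xs.length := by
  induction xs generalizing l b with
  | nil => simp at h; simp [loop1, h]
  | cons x xs ih =>
    cases b with
    | nil => simp at h
    | cons pq b => simp [loop1]; exact ih _ _ (by simpa using h)

theorem loop2_fst (r : Int) (xs : List Int) (b : List (Int × Int))
    (h : b.length = xs.length) : (loop2 r xs b).1 = H r xs := by
  induction xs generalizing b with
  | nil => simp [loop2, H]
  | cons x xs ih =>
    cases b with
    | nil => simp at h
    | cons pq b =>
      obtain ⟨p, q⟩ := pq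
      simp [loop2, H, ih b (by simpa using h)]

theorem loopABC (xs : List Int) (b : List (Int × Int)) (l r ans : Int)
    (h : b.length = xs.length) :
    loop3 ans xs ((loop2 r xs (loop1 l xs b)).2) = ans + cO l r xs := by
  induction xs generalizing b l ans with
  | nil => simp at h; simp [h, loop3, cO]
  | cons x xs ih =>
    cases b with
    | nil => simp at h
    | cons pq b =>
      obtain ⟨p, q⟩ := pq
      have hb : b.length = xs.length := by simpa using h
      have hlen : (loop1 (pyMin l x) xs b).length = xs.length := loop1_length _ _ _ hb
      have hfst : (loop2 r xs (loop1 (pyMin l x) xs b)).1 = H r xs := loop2_fst _ _ _ hlen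
      simp only [loop1, loop2, loop3, cO, hfst]
      have hcond : (x ≤ pyMin l x ∨ x ≤ pyMin (H r xs) x) ↔ (x ≤ l ∨ x ≤ H r xs) := by
        rw [pyMin_eq_min, pyMin_eq_min]; omega
      by_cases hc : x ≤ l ∨ x ≤ H r xs
      · rw [if_pos (hcond.mpr hc), if_pos hc, ih _ _ _ hb]; ring
      · rw [if_neg (fun h' => hc (hcond.mp h')), if_neg hc, ih _ _ _ hb]; ring

theorem solution_eq_cO (a : List Int) :
    solution a = cO ((1 : Int) <<< 32) ((1 : Int) <<< 32) a := by
  have := loopABC a (List.replicate a.length (0, 0)) ((1 : Int) <<< 32) ((1 : Int) <<< 32) 0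
    (by simp)
  simpa [solution] using this

-- inclusion–exclusion, pointwise
theorem cO_add_cA (l r : Int) (xs : List Int) :
    cO l r xs + cA l r xs = cF l xs + cB r xs := by
  induction xs generalizing l with
  | nil => simp [cO, cA, cF, cB]
  | cons x xs ih =>
    simp only [cO, cA, cF, cB]
    have := ih (pyMin l x)
    by_cases h1 : x ≤ l <;> by_cases h2 : x ≤ H r xs <;>
      simp [h1, h2] <;> omega

theorem H_le (r : Int) (xs : List Int) : H r xs ≤ r := by
  induction xs with
  | nil => simp [H]
  | cons x xs ih => simp only [H, pyMin_eq_min]; omega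

theorem H_le_mem (r : Int) (xs : List Int) : ∀ y ∈ xs, H r xs ≤ y := by
  induction xs with
  | nil => simp
  | cons x xs ih =>
    intro y hy
    simp only [H, pyMin_eq_min]
    rcases List.mem_cons.mp hy with h | h
    · omega
    · have := ih y h; omega

-- A's backward minimum equals Python's min(a) (first element as fold seed) when r dominates
theorem H_eq_foldl_min (r x : Int) (t : List Int)
    (h : ∀ y ∈ x :: t, y < r) : H r (x :: t) = t.foldl min x := by
  induction t generalizing x with
  | nil =>
    have := h x (by simp)
    simp only [H, pyMin_eq_min, List.foldl_nil]; omega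
  | cons y t ih =>
    have hyt : ∀ z ∈ y :: t, z < r := fun z hz => h z (by simp at hz ⊢; tauto)
    have hx : x < r := h x (by simp)
    have hrec : H r (x :: y :: t) = pyMin (H r (y :: t)) x := rfl
    rw [hrec, ih y hyt, pyMin_eq_min, List.foldl_cons]
    -- min (t.foldl min y) x = t.foldl min (min x y)
    have comm : ∀ (t : List Int) (a b : Int), t.foldl min (min a b) = min a (t.foldl min b) := by
      intro t
      induction t with
      | nil => intro a b; simp
      | cons z t iht =>
        intro a b
        simp only [List.foldl_cons]
        rw [min_assoc, iht]
    rw [comm t x y, min_comm]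

-- the AND-count equals the multiplicity of the minimum (when it is allowed by l)
theorem cA_eq_count (l r : Int) (xs : List Int) (h : ∀ y ∈ xs, y < r) :
    cA l r xs = if H r xs ≤ l then (xs.count (H r xs) : Int) else 0 := by
  induction xs generalizing l with
  | nil =>
    simp only [cA, H, List.count_nil]
    split <;> simp
  | cons x t ih =>
    have ht : ∀ y ∈ t, y < r := fun y hy => h y (by simp [hy])
    have hx : x < r := h x (by simp)
    have hHt_le : ∀ y ∈ t, H r t ≤ y := H_le_mem r t
    have hhead : H r (x :: t) = pyMin (H r t) x := rfl
    rw [cA, ih _ ht, hhead]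
    simp only [pyMin_eq_min]
    by_cases hxM : x ≤ H r t
    · by_cases hstrict : x < H r t
      · -- new strict minimum x: tail contributes nothing
        have hmin : min (H r t) x = x := by omega
        have hcnt0 : t.count x = 0 := by
          rw [List.count_eq_zero]
          intro hmem
          have := hHt_le x hmem; omega
        have htail : ¬ (H r t ≤ min l x) := by omega
        rw [if_neg htail, hmin]
        by_cases hl : x ≤ l
        · rw [if_pos ⟨hl, hxM⟩, if_pos hl]
          simp [List.count_cons_self, hcnt0]
        · rw [if_neg (fun hc => hl hc.1), if_neg hl]
          ring
      · -- x = H r t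
        have hx_eq : x = H r t := by omega
        have hmin : min (H r t) x = H r t := by omega
        rw [hmin]
        by_cases hl : x ≤ l
        · have htail : H r t ≤ min l x := by omega
          rw [if_pos ⟨hl, hxM⟩, if_pos htail, if_pos (by omega : H r t ≤ l)]
          rw [← hx_eq, List.count_cons_self]
          push_cast; ring
        · have htail : ¬ (H r t ≤ min l x) := by omega
          rw [if_neg (fun hc => hl hc.1), if_neg htail, if_neg (by omega : ¬ (H r t ≤ l))]
          simp
    · -- H r t < x: minimum stays in the tail
      have hmin : min (H r t) x = H r t := by omega
      rw [hmin, if_neg (fun hc => hxM hc.2)]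
      have hcc : (x :: t).count (H r t) = t.count (H r t) := by
        simp [List.count_cons]
        omega
      by_cases hl : H r t ≤ l
      · rw [if_pos (by omega : H r t ≤ min l x), if_pos hl, hcc]
        ring
      · rw [if_neg (by omega : ¬ (H r t ≤ min l x)), if_neg hl]
        ring

-- Source B's fold, generalized
theorem foldl_step_eq_cF (xs : List Int) (c m : Int) :
    (xs.foldl (fun (s : Int × Int) x => if x ≤ s.2 then (s.1 + 1, x) else s) (c, m)).1
      = c + cF m xs := by
  induction xs generalizing c m with
  | nil => simp [cF]
  | cons x xs ih =>
    simp only [List.foldl_cons, cF]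
    by_cases hx : x ≤ m
    · have : pyMin m x = x := by rw [pyMin_eq_min]; omega
      rw [if_pos hx, if_pos hx, this, ih]; ring
    · have : pyMin m x = m := by rw [pyMin_eq_min]; omega
      rw [if_neg hx, if_neg hx, this, ih]; ring

theorem countRunningMins_eq_cF (L : Int) (xs : List Int)
    (hne : xs ≠ []) (h : ∀ y ∈ xs, y < L) :
    countRunningMins xs = cF L xs := by
  cases xs with
  | nil => exact absurd rfl hne
  | cons x t =>
    have hx : x < L := h x (by simp)
    have hmm : pyMin L x = x := by rw [pyMin_eq_min]; omega
    simp only [countRunningMins]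
    rw [List.foldl_cons, if_pos (le_refl x), foldl_step_eq_cF]
    simp only [cF, hmm, if_pos (le_of_lt hx)]
    ring

-- left fold of pyMin (running minimum of a traversal)
def fL (r : Int) (xs : List Int) : Int := xs.foldl pyMin r

theorem cF_append (l : Int) (u v : List Int) :
    cF l (u ++ v) = cF l u + cF (fL l u) v := by
  induction u generalizing l with
  | nil => simp [cF, fL]
  | cons x u ih =>
    simp only [List.cons_append, cF, fL, List.foldl_cons]
    rw [ih (pyMin l x)]
    simp [fL]; ring

theorem fL_reverse_eq_H (r : Int) (xs : List Int) : fL r xs.reverse = H r xs := by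
  induction xs with
  | nil => simp [fL, H]
  | cons x t ih =>
    simp only [List.reverse_cons, fL, List.foldl_append, List.foldl_cons, List.foldl_nil, H]
    rw [← fL, ih]

theorem cB_eq_cF_reverse (r : Int) (xs : List Int) : cB r xs = cF r xs.reverse := by
  induction xs with
  | nil => simp [cB, cF]
  | cons x t ih =>
    simp only [List.reverse_cons, cB]
    rw [cF_append, ← ih, fL_reverse_eq_H]
    simp [cF]; ring

theorem shiftINF : ((1 : Int) <<< 32) = 4294967296 := by decide

theorem dom_lt_INF (a : List Int) (hd : Dom_solution a) :
    ∀ y ∈ a, y < (1 : Int) <<< 32 := by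
  intro y hy
  unfold Dom_solution at hd
  rw [List.all_eq_true] at hd
  have := hd y hy
  simp only [pvDomInt, decide_eq_true_eq] at this
  rw [shiftINF]; omega

-- ===== VERDICT (by name: the statement is the Claim_ definition above) =====
theorem solution_spec : Claim_equal_solution := by
  intro a hd
  unfold Spec_solution
  cases a with
  | nil => decide
  | cons x t =>
    have hlt : ∀ y ∈ x :: t, y < (1 : Int) <<< 32 := dom_lt_INF _ hd
    have hltrev : ∀ y ∈ (x :: t).reverse, y < (1 : Int) <<< 32 := by
      intro y hy; exact hlt y (List.mem_reverse.mp hy)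
    have hM : H ((1 : Int) <<< 32) (x :: t) = t.foldl min x := H_eq_foldl_min _ x t hlt
    -- A's side
    rw [solution_eq_cO]
    -- B's side
    unfold solution_alt
    simp only [PySem.List.min?_id_cons]
    have hcount : (PySem.List.count (x :: t) (t.foldl min x) : Int)
        = ((x :: t).count (t.foldl min x) : Int) := by
      rw [PySem.List.count_eq]
    rw [hcount, ← hM]
    rw [countRunningMins_eq_cF ((1 : Int) <<< 32) _ (by simp) hlt,
        countRunningMins_eq_cF ((1 : Int) <<< 32) _ (by simp) hltrev,
        ← cB_eq_cF_reverse]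
    have hie := cO_add_cA ((1 : Int) <<< 32) ((1 : Int) <<< 32) (x :: t)
    have hA := cA_eq_count ((1 : Int) <<< 32) ((1 : Int) <<< 32) (x :: t) hlt
    rw [if_pos (H_le _ (x :: t))] at hA
    omega
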